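-- pv_equiv track=rewrite | github.com/Antonios-Kagias/aida-thesis | code/server_test.py | letter_counts_by_position
-- ===== SOURCE A (Python) =====
-- from collections import defaultdict
-- from collections import defaultdict
-- from collections import defaultdict
--
-- def letter_counts_by_position(strings):
--     if not strings:
--         return {}
--
--     # Determine the maximum length of the strings
--     max_length = max(len(string) for string in strings)
--
--     # Initialize a dictionary to store the counts of each letter at each position
--     letter_counts = defaultdict(lambda: [0] * max_length)
--
--     # Initialize a dictionary to store the total lengths of strings each letter appears in
--     letter_lengths = defaultdict(int)
--
--     # Iterate through each string
--     for string in strings: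
--         string_length = len(string)
--         for i, char in enumerate(string):
--             letter_counts[char][i] += 1
--             letter_lengths[char] += string_length
--
--     return dict(letter_counts), dict(letter_lengths)
-- ===== SOURCE B (Python) =====
-- from collections import Counter
--
-- def letter_counts_by_position(strings):
--     if not strings:
--         return {}, {}
--
--     max_length = max(map(len, strings))
--
--     # characters in first-occurrence order across the concatenated strings
--     order = list(dict.fromkeys(c for s in strings for c in s))
--
--     # column-by-column: tally of the characters present at each position i
--     columns = [Counter(s[i] for s in strings if i < len(s)) for i in range(max_length)]
--
--     letter_counts = {c: [col[c] for col in columns] for c in order}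
--     letter_lengths = {c: sum(s.count(c) * len(s) for s in strings) for c in order}
--     return letter_counts, letter_lengths
-- ===== Notes on version B (the rewrite author's own statement) =====
-- stated objective: alternative
-- what changed: Replaces A's single nested loop that mutates two defaultdicts per character with a column-by-column tally (one Counter per position) plus a separate per-character sum of count*length, assembling both result dicts by comprehension over the first-occurrence character order. Pre_ excludes only the empty list, on which A returns a bare {} instead of a pair of dicts (not a value of the declared pair type); B there returns ({}, {}).
-- outside the precondition, e.g. on letter_counts_by_position([]): A returns {}, B returns ({}, {})
import Mathlib
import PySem

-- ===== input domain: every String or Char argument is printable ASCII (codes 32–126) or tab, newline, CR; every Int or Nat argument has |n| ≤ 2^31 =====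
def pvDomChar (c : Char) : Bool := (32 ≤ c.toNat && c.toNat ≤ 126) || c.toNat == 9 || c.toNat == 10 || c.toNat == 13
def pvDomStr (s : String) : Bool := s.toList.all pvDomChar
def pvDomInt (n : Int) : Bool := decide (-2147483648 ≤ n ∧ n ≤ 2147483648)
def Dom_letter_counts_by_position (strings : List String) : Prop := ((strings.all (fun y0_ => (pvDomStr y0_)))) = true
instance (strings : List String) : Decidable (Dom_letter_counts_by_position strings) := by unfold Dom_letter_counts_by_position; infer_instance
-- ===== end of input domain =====

-- B replaces A's single nested loop mutating two defaultdicts with a column-by-column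
-- tally (one counter per position) plus a separate per-character count*length sum
-- (objective: alternative decomposition, not claimed faster).

-- ===== PORT A =====
-- A's dict keys are the 1-character strings; the port keeps Char keys internally and
-- packs them into String at the return boundary.
def letter_counts_by_position (strings : List String) : (List (String × List Int)) × (List (String × Int)) :=
  if strings = [] then ([], [])
  else
    let max_length : Int := (PySem.List.max? (strings.map (fun s => PySem.Str.len s)) (fun x => x)).getD 0
    let st := strings.foldl
      (fun (st : PySem.Dict Char (List Int) × PySem.Dict Char Int) s =>
        let string_length := PySem.Str.len s
        (PySem.List.enumerate s.toList 0).foldl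
          (fun st p =>
            (st.1.modify p.2 (List.replicate max_length.toNat 0)
               (fun l => PySem.List.pySetD l p.1 (PySem.List.pyGetD l p.1 0 + 1)),
             st.2.modify p.2 0 (fun v => v + string_length)))
          st)
      (PySem.Dict.empty, PySem.Dict.empty)
    (st.1.items.map (fun q => (String.ofList [q.1], q.2)),
     st.2.items.map (fun q => (String.ofList [q.1], q.2)))

-- ===== PORT B =====
-- range(max_length) is ported as List.range max_length.toNat (max_length is a max of string lengths, ≥ 0)
def letter_counts_by_position_alt (strings : List String) : (List (String × List Int)) × (List (String × Int)) :=
  if strings = [] then ([], [])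
  else
    let max_length : Int := (PySem.List.max? (strings.map (fun s => PySem.Str.len s)) (fun x => x)).getD 0
    let order : List Char := PySem.List.dedup (strings.flatMap (fun s => s.toList))
    let columns : List (PySem.Dict Char Int) :=
      (List.range max_length.toNat).map (fun (i : Nat) =>
        PySem.Dict.counter ((strings.filter (fun s => decide ((i : Int) < PySem.Str.len s))).map
          (fun s => PySem.List.pyGetD s.toList (i : Int) ' ')))
    (order.map (fun c => (String.ofList [c], columns.map (fun col => col.getD c 0))),
     order.map (fun c => (String.ofList [c], (strings.map (fun s => (s.toList.count c : Int) * PySem.Str.len s)).sum)))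

-- ===== PRECONDITION & SPEC =====
-- Pre_ excludes only the empty list, on which A returns a bare {} instead of a pair of
-- dicts (not a value of the declared pair type); B there returns ({}, {}).
def Pre_letter_counts_by_position (strings : List String) : Prop := strings ≠ []
instance (strings : List String) : Decidable (Pre_letter_counts_by_position strings) := by unfold Pre_letter_counts_by_position; infer_instance
def pvWitness_letter_counts_by_position : List String := ["ab", "b"]
def Spec_letter_counts_by_position (strings : List String) (out : (List (String × List Int)) × (List (String × Int))) : Prop := out = letter_counts_by_position_alt strings
instance (strings : List String) (out : (List (String × List Int)) × (List (String × Int))) : Decidable (Spec_letter_counts_by_position strings out) := by unfold Spec_letter_counts_by_position; infer_instance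

-- ===== CLAIM (what is proved, stated in full; the proofs are below) =====
def Claim_equal_letter_counts_by_position : Prop := ∀ (strings : List String), Dom_letter_counts_by_position strings → Pre_letter_counts_by_position strings → Spec_letter_counts_by_position strings (letter_counts_by_position strings)

-- ===== LEMMAS AND PROOFS =====

-- the per-string stream of (char, index, string-length) triples that A's nested loop processes
def pvTriples (s : String) : List (Char × Int × Int) :=
  (PySem.List.enumerate s.toList 0).map (fun p => (p.2, p.1, PySem.Str.len s))

def pvStepC (R : List Int) (d : PySem.Dict Char (List Int)) (t : Char × Int × Int) : PySem.Dict Char (List Int) :=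
  d.modify t.1 R (fun l => PySem.List.pySetD l t.2.1 (PySem.List.pyGetD l t.2.1 0 + 1))

def pvStepL (d : PySem.Dict Char Int) (t : Char × Int × Int) : PySem.Dict Char Int :=
  d.modify t.1 0 (fun v => v + t.2.2)

theorem pv_inner (R : List Int) (s : String) (st : PySem.Dict Char (List Int) × PySem.Dict Char Int) :
    (PySem.List.enumerate s.toList 0).foldl
      (fun st p =>
        (st.1.modify p.2 R (fun l => PySem.List.pySetD l p.1 (PySem.List.pyGetD l p.1 0 + 1)),
         st.2.modify p.2 0 (fun v => v + PySem.Str.len s))) st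
    = ((pvTriples s).foldl (pvStepC R) st.1, (pvTriples s).foldl pvStepL st.2) := by
  obtain ⟨a, b⟩ := st
  calc (PySem.List.enumerate s.toList 0).foldl
        (fun st p =>
          (st.1.modify p.2 R (fun l => PySem.List.pySetD l p.1 (PySem.List.pyGetD l p.1 0 + 1)),
           st.2.modify p.2 0 (fun v => v + PySem.Str.len s))) (a, b)
      = (PySem.List.enumerate s.toList 0).foldl
          (fun st p =>
            ((fun d (p : Int × Char) => pvStepC R d (p.2, p.1, PySem.Str.len s)) st.1 p,
             (fun d (p : Int × Char) => pvStepL d (p.2, p.1, PySem.Str.len s)) st.2 p)) (a, b) := rfl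
    _ = ((PySem.List.enumerate s.toList 0).foldl
            (fun d (p : Int × Char) => pvStepC R d (p.2, p.1, PySem.Str.len s)) a,
         (PySem.List.enumerate s.toList 0).foldl
            (fun d (p : Int × Char) => pvStepL d (p.2, p.1, PySem.Str.len s)) b) :=
        PySem.List.foldl_prod_mk
          (fun d (p : Int × Char) => pvStepC R d (p.2, p.1, PySem.Str.len s))
          (fun d (p : Int × Char) => pvStepL d (p.2, p.1, PySem.Str.len s))
          (PySem.List.enumerate s.toList 0) a b
    _ = ((pvTriples s).foldl (pvStepC R) a, (pvTriples s).foldl pvStepL b) := by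
        simp [pvTriples, List.foldl_map]

-- A's nested loop is the flat fold of the two step functions over the triple stream
theorem pv_flatten (R : List Int) (strings : List String)
    (st : PySem.Dict Char (List Int) × PySem.Dict Char Int) :
    strings.foldl
      (fun st s =>
        (PySem.List.enumerate s.toList 0).foldl
          (fun st p =>
            (st.1.modify p.2 R
               (fun l => PySem.List.pySetD l p.1 (PySem.List.pyGetD l p.1 0 + 1)),
             st.2.modify p.2 0 (fun v => v + PySem.Str.len s)))
          st)
      st
    = ((strings.flatMap pvTriples).foldl (pvStepC R) st.1,
       (strings.flatMap pvTriples).foldl pvStepL st.2) := by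
  induction strings generalizing st with
  | nil => simp
  | cons s ss ih =>
    simp only [List.foldl_cons, List.flatMap_cons, List.foldl_append]
    rw [pv_inner R s st, ih]

theorem pv_fst_triples (s : String) : (pvTriples s).map (fun t => t.1) = s.toList := by
  simp [pvTriples, Function.comp_def, PySem.List.map_snd_enumerate]

theorem pv_getD_foldl_stepC (R : List Int) (T : List (Char × Int × Int))
    (d : PySem.Dict Char (List Int)) (c : Char) :
    (T.foldl (pvStepC R) d).getD c R
      = ((T.filter (fun t => t.1 = c)).map (fun t => t.2.1)).foldl
          (fun l i => PySem.List.pySetD l i (PySem.List.pyGetD l i 0 + 1)) (d.getD c R) := by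
  induction T generalizing d with
  | nil => simp
  | cons t T ih =>
    by_cases h : t.1 = c
    · subst h
      simp only [List.foldl_cons, List.filter_cons, decide_true, if_pos, List.map_cons]
      rw [ih]
      simp [pvStepC]
    · simp only [List.foldl_cons, List.filter_cons]
      rw [if_neg (by simpa using h), ih]
      have : (pvStepC R d t).getD c R = d.getD c R := by
        simp [pvStepC, PySem.Dict.getD_modify, Ne.symm h]
      rw [this]

theorem pv_getD_foldl_stepL (T : List (Char × Int × Int))
    (d : PySem.Dict Char Int) (c : Char) :
    (T.foldl pvStepL d).getD c 0
      = d.getD c 0 + ((T.filter (fun t => t.1 = c)).map (fun t => t.2.2)).sum := by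
  induction T generalizing d with
  | nil => simp
  | cons t T ih =>
    by_cases h : t.1 = c
    · subst h
      simp only [List.foldl_cons, List.filter_cons, decide_true, if_pos, List.map_cons, List.sum_cons]
      rw [ih]
      have : (pvStepL d t).getD t.1 0 = d.getD t.1 0 + t.2.2 := by
        simp [pvStepL]
      rw [this]; ring
    · simp only [List.foldl_cons, List.filter_cons]
      rw [if_neg (by simpa using h), ih]
      have : (pvStepL d t).getD c 0 = d.getD c 0 := by
        simp [pvStepL, PySem.Dict.getD_modify, Ne.symm h]
      rw [this]

theorem pv_len_incr (idxs : List Int) (l : List Int) :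
    (idxs.foldl (fun l i => PySem.List.pySetD l i (PySem.List.pyGetD l i 0 + 1)) l).length
      = l.length := by
  induction idxs generalizing l with
  | nil => rfl
  | cons i idxs ih => rw [List.foldl_cons, ih, PySem.List.length_pySetD]

theorem pv_getD_incr (idxs : List Int) (l : List Int) (j : Nat)
    (h : ∀ i ∈ idxs, 0 ≤ i ∧ i.toNat < l.length) :
    PySem.List.pyGetD
        (idxs.foldl (fun l i => PySem.List.pySetD l i (PySem.List.pyGetD l i 0 + 1)) l)
        (j : Int) 0
      = PySem.List.pyGetD l (j : Int) 0 + (idxs.count (j : Int) : Int) := by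
  induction idxs generalizing l with
  | nil => simp
  | cons i idxs ih =>
    obtain ⟨h0, hlt⟩ := h i (List.mem_cons_self ..)
    have hrest : ∀ x ∈ idxs, 0 ≤ x ∧ x.toNat <
        (PySem.List.pySetD l i (PySem.List.pyGetD l i 0 + 1)).length := by
      intro x hx
      have := h x (List.mem_cons_of_mem _ hx)
      rwa [PySem.List.length_pySetD]
    rw [List.foldl_cons, ih _ hrest]
    have hi' : ((i.toNat : Nat) : Int) = i := Int.toNat_of_nonneg h0
    rw [← hi', PySem.List.pyGetD_pySetD_natCast l i.toNat j _ 0 hlt]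
    rw [List.count_cons]
    by_cases hj : j = i.toNat
    · subst hj
      rw [hi']
      rw [if_pos rfl, if_pos (by simp)]
      push_cast
      ring
    · rw [if_neg hj, if_neg (by simp only [beq_iff_eq]; intro he; exact hj (by omega))]
      push_cast
      ring

theorem pv_shift (s0 j : Int) (x : Char) (xs : List Char) (c : Char) (hne : s0 ≠ j) :
    (s0 ≤ j ∧ j - s0 < ((x :: xs).length : Int) ∧ (x :: xs).getD (j - s0).toNat ' ' = c)
      ↔ (s0 + 1 ≤ j ∧ j - (s0 + 1) < (xs.length : Int) ∧ xs.getD (j - (s0 + 1)).toNat ' ' = c) := by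
  constructor
  · rintro ⟨h1, h2, h3⟩
    have hle : s0 + 1 ≤ j := by omega
    have ht : (j - s0).toNat = (j - (s0 + 1)).toNat + 1 := by omega
    rw [ht, List.getD_cons_succ] at h3
    refine ⟨hle, ?_, h3⟩
    simp only [List.length_cons] at h2
    push_cast at h2 ⊢
    omega
  · rintro ⟨h1, h2, h3⟩
    have ht : (j - s0).toNat = (j - (s0 + 1)).toNat + 1 := by omega
    refine ⟨by omega, ?_, ?_⟩
    · simp only [List.length_cons]
      push_cast at h2 ⊢
      omega
    · rw [ht, List.getD_cons_succ]
      exact h3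

theorem pv_count_enumerate (xs : List Char) (c : Char) : ∀ (s0 j : Int),
    (((PySem.List.enumerate xs s0).filter (fun p => p.2 = c)).map (fun p => p.1)).count j
      = if s0 ≤ j ∧ j - s0 < (xs.length : Int) ∧ xs.getD (j - s0).toNat ' ' = c then 1 else 0 := by
  induction xs with
  | nil =>
    intro s0 j
    simp only [PySem.List.enumerate_nil, List.filter_nil, List.map_nil, List.count_nil,
      List.length_nil, Nat.cast_zero]
    rw [if_neg]
    rintro ⟨h1, h2, -⟩
    omega
  | cons x xs ih =>
    intro s0 j
    rw [PySem.List.enumerate_cons, List.filter_cons]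
    by_cases hx : x = c
    · rw [if_pos (by simpa using hx), List.map_cons]
      dsimp only
      rw [List.count_cons, ih (s0 + 1) j]
      simp only [beq_iff_eq]
      by_cases hs : s0 = j
      · subst hs
        rw [if_pos rfl, if_neg (by rintro ⟨h1, -, -⟩; omega)]
        have hpos : s0 ≤ s0 ∧ s0 - s0 < ((x :: xs).length : Int) ∧
            (x :: xs).getD (s0 - s0).toNat ' ' = c := by
          refine ⟨le_refl _, ?_, ?_⟩
          · simp only [List.length_cons]; push_cast; omega
          · simpa [sub_self] using hx
        rw [if_pos hpos]
      · rw [if_neg hs, add_zero, if_congr (pv_shift s0 j x xs c hs) rfl rfl]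
    · rw [if_neg (by simpa using hx), ih (s0 + 1) j]
      by_cases hs : s0 = j
      · subst hs
        rw [if_neg (by rintro ⟨h1, -, -⟩; omega), if_neg]
        rintro ⟨-, -, h3⟩
        rw [sub_self] at h3
        simp only [Int.toNat_zero, List.getD_cons_zero] at h3
        exact hx h3
      · rw [if_congr (pv_shift s0 j x xs c hs) rfl rfl]

theorem pv_count_triples (s : String) (c : Char) (j : Nat) :
    (((pvTriples s).filter (fun t => t.1 = c)).map (fun t => t.2.1)).count (j : Int)
      = if (j : Int) < PySem.Str.len s ∧ PySem.List.pyGetD s.toList (j : Int) ' ' = c then 1 else 0 := by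
  have h0 : ((pvTriples s).filter (fun t => t.1 = c)).map (fun t => t.2.1)
      = ((PySem.List.enumerate s.toList 0).filter (fun p => p.2 = c)).map (fun p => p.1) := by
    unfold pvTriples
    rw [List.filter_map, List.map_map]
    rfl
  have hlen : PySem.Str.len s = (s.toList.length : Int) := by
    rw [PySem.Str.len_eq_length]
    simp
  rw [h0, pv_count_enumerate s.toList c 0 (j : Int)]
  apply if_congr _ rfl rfl
  rw [sub_zero, Int.toNat_natCast]
  constructor
  · rintro ⟨-, h2, h3⟩
    exact ⟨by rw [hlen]; exact h2, by rw [PySem.List.pyGetD_natCast]; exact h3⟩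
  · rintro ⟨h1, h2⟩
    exact ⟨Int.natCast_nonneg _, by rw [hlen] at h1; exact h1,
      by rw [PySem.List.pyGetD_natCast] at h2; exact h2⟩

theorem pv_countP_enum (xs : List Char) (c : Char) : ∀ s0 : Int,
    (PySem.List.enumerate xs s0).countP (fun p => decide (p.2 = c)) = xs.count c := by
  induction xs with
  | nil => intro s0; simp
  | cons x xs ih =>
    intro s0
    rw [PySem.List.enumerate_cons]
    simp [List.countP_cons, List.count_cons, ih (s0 + 1), beq_iff_eq]

theorem pv_sum_triples (s : String) (c : Char) :
    (((pvTriples s).filter (fun t => t.1 = c)).map (fun t => t.2.2)).sum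
      = (s.toList.count c : Int) * PySem.Str.len s := by
  unfold pvTriples
  rw [List.filter_map, List.map_map]
  have h1 : ((fun (t : Char × Int × Int) => t.2.2) ∘
      (fun (p : Int × Char) => (p.2, p.1, PySem.Str.len s))) = fun _ => PySem.Str.len s := rfl
  have h2 : ((fun (t : Char × Int × Int) => decide (t.1 = c)) ∘
      (fun (p : Int × Char) => (p.2, p.1, PySem.Str.len s))) = fun p => decide (p.2 = c) := rfl
  rw [h1, h2, List.map_const', List.sum_replicate, ← List.countP_eq_length_filter]
  rw [pv_countP_enum s.toList c 0, nsmul_eq_mul]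

theorem pv_count_flat (strings : List String) (c : Char) (j : Int) :
    (((strings.flatMap pvTriples).filter (fun t => t.1 = c)).map (fun t => t.2.1)).count j
      = (strings.map (fun s =>
          (((pvTriples s).filter (fun t => t.1 = c)).map (fun t => t.2.1)).count j)).sum := by
  induction strings with
  | nil => simp
  | cons s ss ih =>
    simp [List.flatMap_cons, List.filter_append, List.map_append, List.count_append, ih]

theorem pv_sum_flat (strings : List String) (c : Char) :
    (((strings.flatMap pvTriples).filter (fun t => t.1 = c)).map (fun t => t.2.2)).sum
      = (strings.map (fun s =>
          (((pvTriples s).filter (fun t => t.1 = c)).map (fun t => t.2.2)).sum)).sum := by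
  induction strings with
  | nil => simp
  | cons s ss ih =>
    simp [List.flatMap_cons, List.filter_append, List.map_append, ih]

theorem pv_col_count (strings : List String) (c : Char) (j : Int) :
    (strings.map (fun s =>
        if j < PySem.Str.len s ∧ PySem.List.pyGetD s.toList j ' ' = c then 1 else 0)).sum
      = ((strings.filter (fun s => decide (j < PySem.Str.len s))).map
          (fun s => PySem.List.pyGetD s.toList j ' ')).count c := by
  induction strings with
  | nil => simp
  | cons s ss ih =>
    simp only [List.map_cons, List.sum_cons, List.filter_cons]
    by_cases h1 : j < PySem.Str.len s
    · by_cases h2 : PySem.List.pyGetD s.toList j ' ' = c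
      · have hp : j < PySem.Str.len s ∧ PySem.List.pyGetD s.toList j ' ' = c := ⟨h1, h2⟩
        rw [if_pos hp, if_pos (by simpa using h1), List.map_cons, List.count_cons,
          if_pos (by simpa using h2), ih]
        omega
      · have hq : ¬(j < PySem.Str.len s ∧ PySem.List.pyGetD s.toList j ' ' = c) :=
          fun h => h2 h.2
        rw [if_neg hq, if_pos (by simpa using h1), List.map_cons, List.count_cons,
          if_neg (by simpa using h2), ih]
        omega
    · have hq : ¬(j < PySem.Str.len s ∧ PySem.List.pyGetD s.toList j ' ' = c) :=
        fun h => h1 h.1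
      rw [if_neg hq, if_neg (by simpa using h1), ih]
      omega

-- characterisation of the keys of A's two dicts
theorem pv_keys_C (R : List Int) (strings : List String) :
    ((strings.flatMap pvTriples).foldl (pvStepC R) PySem.Dict.empty).keys
      = PySem.Set.ofList (strings.flatMap (fun s => s.toList)) := by
  have h := PySem.Dict.keys_foldl_modify_key (strings.flatMap pvTriples)
      (fun t : Char × Int × Int => t.1) R
      (fun _ t => fun l => PySem.List.pySetD l t.2.1 (PySem.List.pyGetD l t.2.1 0 + 1))
      PySem.Dict.empty
  have e : (fun (d : PySem.Dict Char (List Int)) (t : Char × Int × Int) =>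
      d.modify t.1 R (fun l => PySem.List.pySetD l t.2.1 (PySem.List.pyGetD l t.2.1 0 + 1)))
      = pvStepC R := rfl
  rw [e] at h
  rw [h, show PySem.Dict.empty.keys = ([] : List Char) from rfl, PySem.Set.update_nil_left]
  congr 1
  rw [List.map_flatMap]
  simp only [pv_fst_triples]

theorem pv_keys_L (strings : List String) :
    ((strings.flatMap pvTriples).foldl pvStepL PySem.Dict.empty).keys
      = PySem.Set.ofList (strings.flatMap (fun s => s.toList)) := by
  have h := PySem.Dict.keys_foldl_modify_key (strings.flatMap pvTriples)
      (fun t : Char × Int × Int => t.1) (0 : Int)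
      (fun _ t => fun v => v + t.2.2)
      PySem.Dict.empty
  have e : (fun (d : PySem.Dict Char Int) (t : Char × Int × Int) =>
      d.modify t.1 0 (fun v => v + t.2.2)) = pvStepL := rfl
  rw [e] at h
  rw [h, show PySem.Dict.empty.keys = ([] : List Char) from rfl, PySem.Set.update_nil_left]
  congr 1
  rw [List.map_flatMap]
  simp only [pv_fst_triples]

-- ===== VERDICT (by name: the statement is the Claim_ definition above) =====
theorem letter_counts_by_position_spec : Claim_equal_letter_counts_by_position := by
  intro strings hdom hpre
  show letter_counts_by_position strings = letter_counts_by_position_alt strings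
  unfold letter_counts_by_position letter_counts_by_position_alt
  rw [if_neg hpre, if_neg hpre]
  dsimp only
  obtain ⟨m, hm⟩ : ∃ m, PySem.List.max? (strings.map (fun s => PySem.Str.len s)) (fun x => x) = some m := by
    cases h : PySem.List.max? (strings.map (fun s => PySem.Str.len s)) (fun x => x) with
    | none =>
      rw [PySem.List.max?_eq_none_iff, List.map_eq_nil_iff] at h
      exact absurd h hpre
    | some m => exact ⟨m, rfl⟩
  rw [hm]
  simp only [Option.getD_some]
  rw [pv_flatten (List.replicate m.toNat 0) strings (PySem.Dict.empty, PySem.Dict.empty)]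
  have hmax : ∀ s ∈ strings, PySem.Str.len s ≤ m := by
    intro s hs
    exact PySem.List.max?_isMax hm _ (List.mem_map_of_mem hs)
  have hlenstr : ∀ s : String, PySem.Str.len s = (s.toList.length : Int) := by
    intro s
    rw [PySem.Str.len_eq_length]
    simp
  have hbd : ∀ c : Char, ∀ i ∈ ((strings.flatMap pvTriples).filter
      (fun t => t.1 = c)).map (fun t => t.2.1),
      0 ≤ i ∧ i.toNat < (List.replicate m.toNat (0 : Int)).length := by
    intro c i hi
    rw [List.mem_map] at hi
    obtain ⟨t, ht, rfl⟩ := hi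
    rw [List.mem_filter] at ht
    obtain ⟨htT, -⟩ := ht
    rw [List.mem_flatMap] at htT
    obtain ⟨s, hs, hts⟩ := htT
    unfold pvTriples at hts
    rw [List.mem_map] at hts
    obtain ⟨p, hp, rfl⟩ := hts
    rw [PySem.List.mem_enumerate_iff] at hp
    obtain ⟨k, hk, rfl⟩ := hp
    have h1 : PySem.Str.len s ≤ m := hmax s hs
    rw [hlenstr s] at h1
    rw [List.length_replicate]
    dsimp only
    constructor
    · omega
    · omega
  have hnodC := pv_keys_C (List.replicate m.toNat 0) strings
  have hnodL := pv_keys_L strings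
  simp only [PySem.List.dedup_eq_ofList]
  refine Prod.ext ?_ ?_
  · -- letter_counts component
    dsimp only
    rw [PySem.Dict.items_eq_map_keys _ (by rw [hnodC]; exact PySem.Set.nodup_ofList _)
      (List.replicate m.toNat 0), hnodC, List.map_map]
    apply List.map_congr_left
    intro c hc
    simp only [Function.comp_def]
    refine congrArg (fun v => (String.ofList [c], v)) ?_
    rw [pv_getD_foldl_stepC, PySem.Dict.getD_empty, List.map_map]
    apply List.ext_getElem
    · rw [pv_len_incr, List.length_replicate]
      simp
    · intro j h1 h2
      have hjm : j < m.toNat := by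
        rw [pv_len_incr, List.length_replicate] at h1
        exact h1
      rw [← List.getD_eq_getElem _ 0 h1, ← PySem.List.pyGetD_natCast]
      rw [pv_getD_incr _ _ j (hbd c)]
      rw [show PySem.List.pyGetD (List.replicate m.toNat (0 : Int)) (j : Int) 0 = 0 from by
        rw [PySem.List.pyGetD_natCast, List.getD_replicate _ hjm]]
      rw [zero_add]
      simp only [List.getElem_map, List.getElem_range, Function.comp_def]
      rw [PySem.Dict.getD_counter]
      congr 1
      rw [pv_count_flat]
      simp only [pv_count_triples]
      rw [pv_col_count]
  · -- letter_lengths component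
    dsimp only
    rw [PySem.Dict.items_eq_map_keys _ (by rw [hnodL]; exact PySem.Set.nodup_ofList _) (0 : Int),
      hnodL, List.map_map]
    apply List.map_congr_left
    intro c hc
    simp only [Function.comp_def]
    refine congrArg (fun v => (String.ofList [c], v)) ?_
    rw [pv_getD_foldl_stepL, PySem.Dict.getD_empty, zero_add]
    rw [pv_sum_flat]
    simp only [pv_sum_triples]
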